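-- pv_equiv track=rewrite | github.com/khm1102/BOJ | 백준/Gold/1744. 수 묶기/수 묶기.py | solve
-- ===== SOURCE A (Python) =====
-- def solve(n, arr):
--     arr.sort()
--     pos = []
--     neg = []
--
--     for num in arr:
--         if num <= 0:
--             neg.append(num)
--         else:
--             pos.append(num)
--
--     pos.reverse()
--     neg.sort()
--     result = 0
--
--     for i in range(0, len(pos) - 1, 2):
--         result += max(pos[i] * pos[i + 1], pos[i] + pos[i + 1])
--
--     for i in range(0, len(neg) - 1, 2):
--         result += neg[i] * neg[i + 1]
--
--     if len(pos) % 2 == 1: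
--         result += pos[-1]
--
--     if len(neg) % 2 == 1:
--         result += neg[-1]
--
--     return result
-- ===== SOURCE B (Python) =====
-- def _pair_products(xs):
--     # xs[0]*xs[1] + xs[2]*xs[3] + ...; a final unpaired element is added as-is
--     it = iter(xs)
--     total = 0
--     for a in it:
--         b = next(it, None)
--         if b is None:
--             return total + a
--         total += a * b
--     return total
--
--
-- def solve(n, arr):
--     # Every 1 contributes exactly 1 (pairing a 1 always uses the sum), so count the 1s
--     # instead of pairing them; positives > 1 always multiply (ab >= a+b when a,b >= 2),
--     # so no max() comparison is needed anywhere.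
--     big = sorted((x for x in arr if x > 1), reverse=True)
--     neg = sorted(x for x in arr if x <= 0)
--     return arr.count(1) + _pair_products(big) + _pair_products(neg)
-- ===== Notes on version B (the rewrite author's own statement) =====
-- stated objective: alternative
-- what changed: B never compares product vs sum: it counts the 1s (each contributes exactly 1), sorts only the numbers > 1 descending and the non-positives ascending, and sums disjoint adjacent-pair PRODUCTS with one recursive helper shared by both sides, whereas A splits into pos/neg lists, re-sorts and reverses them and sums with two index-stepping range loops taking max(product,sum) on the positive side.
import Mathlib
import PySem

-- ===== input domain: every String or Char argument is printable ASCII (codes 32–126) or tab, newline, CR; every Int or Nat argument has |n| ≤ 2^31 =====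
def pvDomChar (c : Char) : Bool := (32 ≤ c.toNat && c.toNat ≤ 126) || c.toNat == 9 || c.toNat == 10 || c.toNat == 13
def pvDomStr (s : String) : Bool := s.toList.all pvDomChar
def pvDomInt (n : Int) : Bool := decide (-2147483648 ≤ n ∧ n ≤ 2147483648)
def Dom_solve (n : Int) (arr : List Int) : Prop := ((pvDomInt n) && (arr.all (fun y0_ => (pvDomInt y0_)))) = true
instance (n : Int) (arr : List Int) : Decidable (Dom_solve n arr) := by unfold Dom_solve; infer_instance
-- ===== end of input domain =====

-- B counts the 1s instead of pairing them and multiplies pairs of >1 positives without any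
-- max() comparison, via one recursive pair-product helper; objective: alternative algorithmic
-- decomposition, same O(n log n) cost. A sorts its list argument in place (B does not);
-- the equivalence proved here is about the return value only.


-- ===== PORT A =====
def solve (n : Int) (arr : List Int) : Int :=
  let arr1 := PySem.List.sorted arr (fun x => x)
  let pn := arr1.foldl
    (fun (pn : List Int × List Int) num =>
      if num ≤ 0 then (pn.1, pn.2 ++ [num]) else (pn.1 ++ [num], pn.2))
    ([], [])
  let pos := pn.1.reverse
  let neg := PySem.List.sorted pn.2 (fun x => x)
  let result : Int := 0
  let result := (PySem.List.pyRange 0 ((pos.length : Int) - 1) 2).foldl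
    (fun acc i =>
      acc + max (PySem.List.pyGetD pos i 0 * PySem.List.pyGetD pos (i + 1) 0)
                (PySem.List.pyGetD pos i 0 + PySem.List.pyGetD pos (i + 1) 0)) result
  let result := (PySem.List.pyRange 0 ((neg.length : Int) - 1) 2).foldl
    (fun acc i => acc + PySem.List.pyGetD neg i 0 * PySem.List.pyGetD neg (i + 1) 0) result
  let result := if (pos.length : Int) % 2 == 1 then result + PySem.List.pyGetD pos (-1) 0 else result
  let result := if (neg.length : Int) % 2 == 1 then result + PySem.List.pyGetD neg (-1) 0 else result
  result

-- ===== PORT B =====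
-- _pair_products of Source B: xs[0]*xs[1] + xs[2]*xs[3] + ...; a final unpaired element as-is
def pairProducts : List Int → Int
  | [] => 0
  | [a] => a
  | a :: b :: t => a * b + pairProducts t

def solve_alt (n : Int) (arr : List Int) : Int :=
  let big := PySem.List.sorted (arr.filter (fun x => decide (1 < x))) (fun x => x) true
  let neg := PySem.List.sorted (arr.filter (fun x => decide (x ≤ 0))) (fun x => x)
  (arr.count 1 : Int) + pairProducts big + pairProducts neg

-- ===== PRECONDITION & SPEC =====
def Spec_solve (n : Int) (arr : List Int) (out : Int) : Prop := out = solve_alt n arr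
instance (n : Int) (arr : List Int) (out : Int) : Decidable (Spec_solve n arr out) := by unfold Spec_solve; infer_instance

-- ===== CLAIM (what is proved, stated in full; the proofs are below) =====
def Claim_equal_solve : Prop := ∀ (n : Int) (arr : List Int), Dom_solve n arr → Spec_solve n arr (solve n arr)

-- ===== LEMMAS AND PROOFS =====

-- sum of f over disjoint adjacent pairs, leftover ignored (shape of A's range loops)
def pairF (f : Int → Int → Int) : List Int → Int
  | a :: b :: t => f a b + pairF f t
  | _ => 0

-- shape of A's positive-side loop body, with the leftover element folded in
def maxPairs : List Int → Int
  | [] => 0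
  | [a] => a
  | a :: b :: t => max (a * b) (a + b) + maxPairs t

theorem pyRange_two_nil (a b : Int) (h : b ≤ a) : PySem.List.pyRange a b 2 = [] := by
  rw [PySem.List.pyRange_of_pos a b (by norm_num)]
  rw [if_neg (by omega)]
  simp

theorem pyRange_two_cons (a b : Int) (h : a < b) :
    PySem.List.pyRange a b 2 = a :: PySem.List.pyRange (a + 2) b 2 := by
  rw [PySem.List.pyRange_of_pos a b (by norm_num), PySem.List.pyRange_of_pos (a+2) b (by norm_num)]
  rw [if_pos h]
  have hc : ((b - a + 2 - 1) / 2).toNat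
      = (if a + 2 < b then ((b - (a+2) + 2 - 1) / 2).toNat else 0) + 1 := by
    split <;> omega
  rw [hc, List.range_succ_eq_map]
  simp only [List.map_cons, List.map_map]
  congr 1
  · norm_num
  · apply List.map_congr_left; intro k _; simp [Function.comp]; ring

theorem loopA (f : Int → Int → Int) (L : List Int) (j : Nat) (r : Int) :
    (PySem.List.pyRange (j : Int) ((L.length : Int) - 1) 2).foldl
      (fun acc i => acc + f (PySem.List.pyGetD L i 0) (PySem.List.pyGetD L (i + 1) 0)) r
    = r + pairF f (L.drop j) := by
  by_cases hj : j + 1 < L.length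
  · rw [pyRange_two_cons _ _ (by omega)]
    simp only [List.foldl_cons]
    have h1 : ((j : Int) + 2) = ((j + 2 : Nat) : Int) := by push_cast; ring
    rw [h1, loopA f L (j + 2)]
    have hjl : j < L.length := by omega
    rw [PySem.List.pyGetD_eq_getElem L 0 (by positivity) (by omega)]
    have h2 : ((j : Int) + 1) = ((j + 1 : Nat) : Int) := by push_cast; ring
    rw [h2, PySem.List.pyGetD_eq_getElem L 0 (by positivity) (by omega)]
    rw [List.drop_eq_getElem_cons hjl, List.drop_eq_getElem_cons hj]
    simp only [pairF, Int.toNat_natCast]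
    ring
  · rw [pyRange_two_nil _ _ (by omega)]
    have : L.drop j = [] ∨ ∃ a, L.drop j = [a] := by
      have hl : (L.drop j).length ≤ 1 := by simp; omega
      match hd : L.drop j with
      | [] => exact Or.inl rfl
      | [a] => exact Or.inr ⟨a, rfl⟩
      | a :: b :: t => rw [hd] at hl; simp at hl
    rcases this with h | ⟨a, h⟩ <;> simp [h, pairF]
termination_by L.length - j
decreasing_by omega

theorem loopA0 (f : Int → Int → Int) (L : List Int) (r : Int) :
    (PySem.List.pyRange 0 ((L.length : Int) - 1) 2).foldl
      (fun acc i => acc + f (PySem.List.pyGetD L i 0) (PySem.List.pyGetD L (i + 1) 0)) r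
    = r + pairF f L := by
  simpa using loopA f L 0 r

theorem getD_neg_one (xs : List Int) (h : xs ≠ []) :
    PySem.List.pyGetD xs (-1) 0 = xs.getLast?.getD 0 := by
  have hl : 0 < xs.length := List.length_pos_iff.mpr h
  simp only [PySem.List.pyGetD, PySem.List.pyGet?, PySem.List.pyIdx?]
  rw [if_neg (by omega), if_pos (by omega)]
  rw [List.getLast?_eq_getElem?]
  simp [Option.bind]

theorem mod2_beq (m : Nat) : (((m : Int)) % 2 == 1) = decide (m % 2 = 1) := by
  rw [Bool.eq_iff_iff]
  simp only [beq_iff_eq, decide_eq_true_eq]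
  omega

theorem split_fold (l : List Int) (p q : List Int) :
    l.foldl (fun (pn : List Int × List Int) num =>
        if num ≤ 0 then (pn.1, pn.2 ++ [num]) else (pn.1 ++ [num], pn.2)) (p, q)
    = (p ++ l.filter (fun x => !decide (x ≤ 0)), q ++ l.filter (fun x => decide (x ≤ 0))) := by
  induction l generalizing p q with
  | nil => simp
  | cons a t ih =>
    by_cases ha : a ≤ 0 <;> simp [ha, ih]

theorem A_val (n : Int) (arr : List Int) (N P : List Int)
    (hfn : (PySem.List.sorted arr (fun x => x)).filter (fun x => !decide (x ≤ 0)) = P)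
    (hfp : (PySem.List.sorted arr (fun x => x)).filter (fun x => decide (x ≤ 0)) = N)
    (hNp : N.Pairwise (· ≤ ·)) :
    solve n arr
      = pairF (fun a b => max (a * b) (a + b)) P.reverse
        + pairF (fun a b => a * b) N
        + (if P.length % 2 = 1 then P.head?.getD 0 else 0)
        + (if N.length % 2 = 1 then N.getLast?.getD 0 else 0) := by
  simp only [solve, split_fold, hfn, hfp, List.nil_append]
  rw [PySem.List.sorted_eq_self_of_pairwise N _ hNp]
  rw [loopA0 (fun a b => max (a * b) (a + b)) P.reverse,
      loopA0 (fun a b => a * b) N]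
  simp only [List.length_reverse, zero_add, mod2_beq]
  by_cases hp : P.length % 2 = 1 <;> by_cases hn : N.length % 2 = 1 <;>
    simp only [hp, hn, decide_true, decide_false, Bool.false_eq_true, if_true, if_false]
  · rw [getD_neg_one P.reverse (by intro h; rw [List.reverse_eq_nil_iff] at h; simp [h] at hp),
        getD_neg_one N (by intro h; simp [h] at hn), List.getLast?_reverse]
  · rw [getD_neg_one P.reverse (by intro h; rw [List.reverse_eq_nil_iff] at h; simp [h] at hp),
        List.getLast?_reverse]
    ring
  · rw [getD_neg_one N (by intro h; simp [h] at hn)]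
    ring
  · ring

-- pairProducts / maxPairs = pair fold + leftover
theorem pp_eq : ∀ (xs : List Int),
    pairProducts xs
      = pairF (fun a b => a * b) xs + (if xs.length % 2 = 1 then xs.getLast?.getD 0 else 0)
  | [] => by simp [pairProducts, pairF]
  | [a] => by simp [pairProducts, pairF]
  | a :: b :: t => by
    simp only [pairProducts, pairF, pp_eq t]
    have hlen : (a :: b :: t).length % 2 = t.length % 2 := by
      simp only [List.length_cons]; omega
    rw [hlen]
    cases t with
    | nil => simp
    | cons c t' => rw [List.getLast?_cons_cons, List.getLast?_cons_cons]; ring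

theorem mp_eq : ∀ (xs : List Int),
    maxPairs xs
      = pairF (fun a b => max (a * b) (a + b)) xs
        + (if xs.length % 2 = 1 then xs.getLast?.getD 0 else 0)
  | [] => by simp [maxPairs, pairF]
  | [a] => by simp [maxPairs, pairF]
  | a :: b :: t => by
    simp only [maxPairs, pairF, mp_eq t]
    have hlen : (a :: b :: t).length % 2 = t.length % 2 := by
      simp only [List.length_cons]; omega
    rw [hlen]
    cases t with
    | nil => simp
    | cons c t' => rw [List.getLast?_cons_cons, List.getLast?_cons_cons]; ring

theorem mp_ones : ∀ (k : Nat), maxPairs (List.replicate k 1) = k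
  | 0 => by simp [maxPairs]
  | 1 => by simp [maxPairs]
  | (k + 2) => by
    rw [List.replicate_succ, List.replicate_succ]
    simp only [maxPairs, mp_ones k]
    push_cast
    norm_num
    omega

theorem mp_big : ∀ (g : List Int) (k : Nat), (∀ x ∈ g, 2 ≤ x) →
    maxPairs (g ++ List.replicate k 1) = pairProducts g + k
  | [], k, _ => by simpa [pairProducts] using mp_ones k
  | [a], k, h => by
    have ha : 2 ≤ a := h a (by simp)
    cases k with
    | zero => simp [maxPairs, pairProducts]
    | succ k' =>
      rw [List.replicate_succ, List.singleton_append]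
      simp only [maxPairs, mp_ones k', pairProducts]
      have hm : max (a * 1) (a + 1) = a + 1 := by
        rw [mul_one]; exact max_eq_right (by omega)
      rw [hm]
      push_cast
      ring
  | a :: b :: g', k, h => by
    simp only [List.cons_append, maxPairs, pairProducts]
    rw [mp_big g' k (fun x hx => h x (by simp [hx]))]
    have ha : 2 ≤ a := h a (by simp)
    have hb : 2 ≤ b := h b (by simp)
    have hm : max (a * b) (a + b) = a * b := max_eq_left (by nlinarith)
    rw [hm]
    ring

-- the sorted non-positive list A builds equals the one B builds
theorem neg_eq (arr : List Int) :
    PySem.List.sorted (arr.filter (fun x => decide (x ≤ 0))) (fun x => x)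
      = (PySem.List.sorted arr (fun x => x)).filter (fun x => decide (x ≤ 0)) := by
  apply PySem.List.sorted_id_eq_of_perm_of_pairwise
  · exact ((PySem.List.sorted_perm arr (fun x => x) false).filter _)
  · exact List.Pairwise.sublist List.filter_sublist
      (PySem.List.sorted_pairwise arr (fun x => x))

-- the positive part of the sorted array is: the 1s, then the >1s ascending
theorem pos_split (arr : List Int) :
    (PySem.List.sorted arr (fun x => x)).filter (fun x => !decide (x ≤ 0))
      = List.replicate (arr.count 1) 1
        ++ PySem.List.sorted (arr.filter (fun x => decide (1 < x))) (fun x => x) := by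
  have hone : List.replicate (arr.count 1) 1 = arr.filter (fun x => x == 1) :=
    (List.filter_beq (l := arr) 1).symm
  rw [hone]
  have hL : List.Perm ((PySem.List.sorted arr (fun x => x)).filter (fun x => !decide (x ≤ 0)))
      (arr.filter (fun x => !decide (x ≤ 0))) :=
    (PySem.List.sorted_perm arr (fun x => x) false).filter _
  have hbig : List.Perm (PySem.List.sorted (arr.filter (fun x => decide (1 < x))) (fun x => x))
      (arr.filter (fun x => decide (1 < x))) :=
    PySem.List.sorted_perm _ (fun x => x) false
  have hsplit2 : List.Perm (arr.filter (fun x => x == 1) ++ arr.filter (fun x => decide (1 < x)))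
      (arr.filter (fun x => !decide (x ≤ 0))) := by
    have h0 := List.filter_append_perm (fun x => x == 1)
      (arr.filter (fun x => !decide (x ≤ 0)))
    rw [List.filter_filter, List.filter_filter] at h0
    have e1 : arr.filter (fun a => (a == 1) && !decide (a ≤ 0))
        = arr.filter (fun x => x == 1) :=
      List.filter_congr (fun x _ => by
        rw [Bool.eq_iff_iff]
        simp only [Bool.and_eq_true, beq_iff_eq, Bool.not_eq_true', decide_eq_false_iff_not]
        omega)
    have e2 : arr.filter (fun a => (!(a == 1)) && !decide (a ≤ 0))
        = arr.filter (fun x => decide (1 < x)) :=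
      List.filter_congr (fun x _ => by
        rw [Bool.eq_iff_iff]
        simp only [Bool.and_eq_true, Bool.not_eq_true', beq_eq_false_iff_ne, ne_eq,
          decide_eq_true_eq, decide_eq_false_iff_not]
        omega)
    rw [e1, e2] at h0
    exact h0
  have hperm : List.Perm ((PySem.List.sorted arr (fun x => x)).filter (fun x => !decide (x ≤ 0)))
      (arr.filter (fun x => x == 1)
        ++ PySem.List.sorted (arr.filter (fun x => decide (1 < x))) (fun x => x)) :=
    hL.trans (hsplit2.symm.trans ((List.Perm.refl _).append hbig.symm))
  refine List.Perm.eq_of_pairwise (le := (· ≤ ·))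
    (fun a b _ _ h h' => le_antisymm h h') ?_ ?_ hperm
  · exact List.Pairwise.sublist List.filter_sublist
      (PySem.List.sorted_pairwise arr (fun x => x))
  · apply List.pairwise_append.mpr
    refine ⟨?_, ?_, ?_⟩
    · rw [← hone]
      exact List.pairwise_replicate.mpr (Or.inr le_rfl)
    · exact PySem.List.sorted_pairwise _ (fun x => x)
    · intro x hx y hy
      have hx1 : x = 1 := by
        have := List.mem_filter.mp hx
        simpa using this.2
      have hy1 : 1 < y := by
        have h1 := (PySem.List.mem_sorted _ _ _ _).mp hy
        have h2 := List.mem_filter.mp h1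
        simpa using h2.2
      omega

-- the descending >1 list is the reverse of the ascending one
theorem big_rev (l : List Int) :
    PySem.List.sorted l (fun x => x) true
      = (PySem.List.sorted l (fun x => x)).reverse := by
  refine List.Perm.eq_of_pairwise (le := fun a b => b ≤ a)
    (fun a b _ _ h h' => le_antisymm h' h) ?_ ?_ ?_
  · exact PySem.List.sorted_pairwise_rev l (fun x => x)
  · exact (List.pairwise_reverse).mpr (PySem.List.sorted_pairwise l (fun x => x))
  · exact (PySem.List.sorted_perm l (fun x => x) true).trans
      ((PySem.List.sorted_perm l (fun x => x) false).symm.trans (List.reverse_perm _).symm)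

-- ===== VERDICT (by name: the statement is the Claim_ definition above) =====
theorem solve_spec : Claim_equal_solve := by
  unfold Claim_equal_solve Spec_solve
  intro n arr _
  have hs := PySem.List.sorted_pairwise arr (fun x => x)
  rw [A_val n arr _ _ rfl rfl (List.Pairwise.sublist List.filter_sublist hs)]
  have h1 := pp_eq ((PySem.List.sorted arr (fun x => x)).filter (fun x => decide (x ≤ 0)))
  have h2 := mp_eq ((PySem.List.sorted arr (fun x => x)).filter (fun x => !decide (x ≤ 0))).reverse
  rw [List.length_reverse, List.getLast?_reverse] at h2
  have h3 : maxPairs ((PySem.List.sorted arr (fun x => x)).filter (fun x => !decide (x ≤ 0))).reverse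
      + pairProducts ((PySem.List.sorted arr (fun x => x)).filter (fun x => decide (x ≤ 0)))
      = solve_alt n arr := by
    rw [pos_split arr, List.reverse_append, List.reverse_replicate]
    have hbig2 : ∀ x ∈ (PySem.List.sorted (arr.filter (fun x => decide (1 < x))) (fun x => x)).reverse,
        2 ≤ x := by
      intro x hx
      have h1' := (PySem.List.mem_sorted _ _ _ _).mp (List.mem_reverse.mp hx)
      have h2' := List.mem_filter.mp h1'
      have : 1 < x := by simpa using h2'.2
      omega
    rw [mp_big _ (arr.count 1) hbig2, ← big_rev, ← neg_eq]
    simp only [solve_alt]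
    ring
  linarith [h1, h2, h3]
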